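-- pv_equiv track=rewrite | github.com/dmdukr/groq-dictation | src/provider_manager.py | check_duplicate_keys
-- ===== SOURCE A (Python) =====
-- def check_duplicate_keys(slots: list[dict]) -> list[str]:
--     """Check for duplicate API keys across slots. Returns warning messages."""
--     seen: dict[str, int] = {}
--     warnings = []
--     for i, slot in enumerate(slots):
--         key = slot.get("api_key", "").strip()
--         if not key:
--             continue
--         if key in seen:
--             warnings.append(f"Слот #{i + 1} має той самий ключ що й #{seen[key] + 1}")
--         else:
--             seen[key] = i
--     return warnings
-- ===== SOURCE B (Python) =====
-- def check_duplicate_keys(slots: list[dict]) -> list[str]: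
--     # Pass 1: group slot indices by their non-empty stripped api_key.
--     groups: dict[str, list[int]] = {}
--     for i, slot in enumerate(slots):
--         key = slot.get("api_key", "").strip()
--         if key:
--             groups.setdefault(key, []).append(i)
--     # Pass 2: every non-first member of a group is a duplicate of the group's first.
--     pairs = []
--     for idxs in groups.values():
--         for i in idxs[1:]:
--             pairs.append((i, idxs[0]))
--     pairs.sort(key=lambda p: p[0])
--     return [f"Слот #{i + 1} має той самий ключ що й #{j + 1}" for i, j in pairs]
-- ===== Notes on version B (the rewrite author's own statement) =====
-- stated objective: alternative
-- what changed: B replaces A's single pass that threads a seen-dict and appends warnings inline with a group-then-sort scheme: one pass groups slot indices by key, then each group's non-first indices are emitted as (index, first) pairs group by group, sorted by index, and formatted.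
import Mathlib
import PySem

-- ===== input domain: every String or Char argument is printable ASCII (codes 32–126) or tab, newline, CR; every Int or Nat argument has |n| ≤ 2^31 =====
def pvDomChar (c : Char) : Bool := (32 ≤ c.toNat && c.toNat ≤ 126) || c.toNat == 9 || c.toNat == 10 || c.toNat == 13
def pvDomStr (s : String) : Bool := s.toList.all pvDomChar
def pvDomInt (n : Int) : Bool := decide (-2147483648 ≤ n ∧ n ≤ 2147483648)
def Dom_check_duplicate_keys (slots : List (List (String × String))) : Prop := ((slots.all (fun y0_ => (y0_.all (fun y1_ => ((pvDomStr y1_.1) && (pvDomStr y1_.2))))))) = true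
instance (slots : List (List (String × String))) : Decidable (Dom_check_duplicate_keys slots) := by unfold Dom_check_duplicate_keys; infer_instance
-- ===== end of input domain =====

-- B replaces A's single pass threading a seen-dict by group-then-sort: group slot
-- indices by key, emit (index, first) pairs per group, sort by index, format (alternative).

-- shared helpers: slot.get("api_key", "").strip() (first-match assoc lookup) and the f-string
def getKey (slot : List (String × String)) : String :=
  PySem.Str.strip (match slot.find? (fun q => q.1 == "api_key") with
                   | some q => q.2
                   | none => "")

def dupMsg (i j : Int) : String :=
  "Слот #" ++ PySem.Int.toStr (i + 1) ++ " має той самий ключ що й #" ++ PySem.Int.toStr (j + 1)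

-- ===== PORT A =====
def check_duplicate_keys (slots : List (List (String × String))) : List String :=
  ((PySem.List.enumerate slots).foldl
    (fun (st : PySem.Dict String Int × List String) p =>
      let key := getKey p.2
      if key = "" then st
      else
        match st.1.get? key with
        | some j => (st.1, st.2 ++ [dupMsg p.1 j])
        | none => (st.1.insert key p.1, st.2))
    (PySem.Dict.empty, [])).2

-- ===== PORT B =====
def check_duplicate_keys_alt (slots : List (List (String × String))) : List String :=
  -- pass 1: groups.setdefault(key, []).append(i)  =  modify key [] (· ++ [i])
  let groups := (PySem.List.enumerate slots).foldl
    (fun (g : PySem.Dict String (List Int)) p =>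
      let key := getKey p.2
      if key = "" then g else g.modify key [] (· ++ [p.1]))
    PySem.Dict.empty
  -- pass 2: per group, idxs[1:] paired with idxs[0] (groups' value lists are never
  -- empty, so Python's idxs[0] never raises; ported with default 0)
  let pairs := groups.values.foldl
    (fun (acc : List (Int × Int)) idxs =>
      acc ++ (PySem.List.slice idxs (some 1) none).map
        (fun i => (i, PySem.List.pyGetD idxs 0 0)))
    []
  (PySem.List.sorted pairs (fun p => p.1) false).map (fun q => dupMsg q.1 q.2)

-- ===== PRECONDITION & SPEC =====
def Spec_check_duplicate_keys (slots : List (List (String × String))) (out : List String) : Prop := out = check_duplicate_keys_alt slots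
instance (slots : List (List (String × String))) (out : List String) : Decidable (Spec_check_duplicate_keys slots out) := by unfold Spec_check_duplicate_keys; infer_instance

-- ===== CLAIM (what is proved, stated in full; the proofs are below) =====
def Claim_equal_check_duplicate_keys : Prop := ∀ (slots : List (List (String × String))), Dom_check_duplicate_keys slots → Spec_check_duplicate_keys slots (check_duplicate_keys slots)

-- ===== LEMMAS AND PROOFS =====

-- A's loop body, on (index, stripped key) pairs
def stepA (st : PySem.Dict String Int × List String) (p : Int × String) :
    PySem.Dict String Int × List String :=
  if p.2 = "" then st
  else
    match st.1.get? p.2 with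
    | some j => (st.1, st.2 ++ [dupMsg p.1 j])
    | none => (st.1.insert p.2 p.1, st.2)

-- the canonical (duplicate index, first index) pairs, in ascending index order
def stepP (keys : List String) (p : Int × String) : Option (Int × Int) :=
  if p.2 = "" then none
  else (PySem.List.index? keys p.2).bind
    (fun j => if (j : Int) ≠ p.1 then some (p.1, (j : Int)) else none)

def Cpairs (keys : List String) : List (Int × Int) :=
  (PySem.List.enumerate keys 0).filterMap (stepP keys)

-- message-producing version of stepP, used by the A-side invariant proof
def stepB (keys : List String) (p : Int × String) : Option String :=
  if p.2 = "" then none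
  else
    match PySem.List.index? keys p.2 with
    | some j => if (j : Int) ≠ p.1 then some (dupMsg p.1 (j : Int)) else none
    | none => none

theorem stepB_eq_map_stepP (keys : List String) (p : Int × String) :
    stepB keys p = (stepP keys p).map (fun q => dupMsg q.1 q.2) := by
  unfold stepB stepP
  split_ifs with h
  · rfl
  · cases PySem.List.index? keys p.2 with
    | none => rfl
    | some j =>
      simp only [Option.bind_some]
      by_cases hj : (j : Int) ≠ p.1 <;> simp [hj]

theorem enumerate_map {α β : Type} (f : α → β) :
    ∀ (xs : List α) (s : Int),
      PySem.List.enumerate (xs.map f) s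
        = (PySem.List.enumerate xs s).map (fun p => (p.1, f p.2)) := by
  intro xs
  induction xs with
  | nil => intro s; simp [PySem.List.enumerate_nil]
  | cons x xs ih => intro s; simp [PySem.List.enumerate_cons, ih]

theorem index?_append_singleton_of_ne (pre : List String) (c v : String) (h : v ≠ c) :
    PySem.List.index? (pre ++ [c]) v = PySem.List.index? pre v := by
  by_cases hv : v ∈ pre
  · exact PySem.List.index?_append_of_mem [c] hv
  · have h1 : PySem.List.index? (pre ++ [c]) v = none := by
      rw [PySem.List.index?_eq_none_iff]
      simp [hv, h]
    have h2 : PySem.List.index? pre v = none := by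
      rw [PySem.List.index?_eq_none_iff]; exact hv
    rw [h1, h2]

-- the A-side loop invariant: seen maps each nonempty key to its first index in the prefix
theorem loop_eq :
    ∀ (rest pre : List String) (seen : PySem.Dict String Int) (acc : List String),
      (∀ k : String, k ≠ "" →
          seen.get? k = (PySem.List.index? pre k).map (fun n => (n : Int))) →
      ((PySem.List.enumerate rest (pre.length : Int)).foldl stepA (seen, acc)).2
        = acc ++ (PySem.List.enumerate rest (pre.length : Int)).filterMap
            (stepB (pre ++ rest)) := by
  intro rest
  induction rest with
  | nil => intro pre seen acc _; simp [PySem.List.enumerate_nil]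
  | cons k rest ih =>
    intro pre seen acc hinv
    rw [PySem.List.enumerate_cons]
    by_cases hk : k = ""
    · -- empty key: A skips, B emits nothing
      subst hk
      have hstep : stepA (seen, acc) ((pre.length : Int), "") = (seen, acc) := by
        simp [stepA]
      have hB : stepB (pre ++ "" :: rest) ((pre.length : Int), "") = none := by
        simp [stepB]
      have hlen : ((pre.length : Int) + 1) = (((pre ++ [""]).length : Nat) : Int) := by
        simp
      have hinv' : ∀ k' : String, k' ≠ "" →
          seen.get? k' = (PySem.List.index? (pre ++ [""]) k').map (fun n => (n : Int)) := by
        intro k' hk'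
        rw [index?_append_singleton_of_ne pre "" k' hk']
        exact hinv k' hk'
      simp only [List.foldl_cons, hstep, List.filterMap_cons, hB]
      rw [hlen, ih (pre ++ [""]) seen acc hinv']
      simp [List.append_assoc]
    · match hg : seen.get? k with
      | some j =>
        -- duplicate: A appends a warning, B's first-occurrence index differs from the position
        have hidx : (PySem.List.index? pre k).map (fun n => (n : Int)) = some j := by
          rw [← hinv k hk]; exact hg
        obtain ⟨n, hn, hnj⟩ : ∃ n, PySem.List.index? pre k = some n ∧ ((n : Nat) : Int) = j := by
          cases hi : PySem.List.index? pre k with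
          | none => rw [hi] at hidx; simp at hidx
          | some m => rw [hi] at hidx; simp at hidx; exact ⟨m, rfl, hidx⟩
        have hn2 := hn
        rw [PySem.List.index?_eq_some_iff] at hn2
        obtain ⟨p1, p2, hpre, hlenp, hnp⟩ := hn2
        have hmem : k ∈ pre := by rw [hpre]; simp
        have hnlt : n < pre.length := by
          rw [hpre, ← hlenp]; simp
        have hstep : stepA (seen, acc) ((pre.length : Int), k)
            = (seen, acc ++ [dupMsg (pre.length : Int) j]) := by
          simp [stepA, hk, hg]
        have hBidx : PySem.List.index? (pre ++ k :: rest) k = some n := by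
          have hsplit : pre ++ k :: rest = (pre ++ [k]) ++ rest := by
            simp
          rw [hsplit]
          rw [PySem.List.index?_append_of_mem rest (by simp [hmem])]
          rw [PySem.List.index?_append_of_mem [k] hmem]
          exact hn
        have hne : ((n : Nat) : Int) ≠ (pre.length : Int) := by
          omega
        have hB : stepB (pre ++ k :: rest) ((pre.length : Int), k)
            = some (dupMsg (pre.length : Int) j) := by
          simp only [stepB, if_neg hk]
          rw [hBidx]
          simp only [if_pos hne]
          rw [hnj]
        have hinv' : ∀ k' : String, k' ≠ "" →
            seen.get? k' = (PySem.List.index? (pre ++ [k]) k').map (fun n => (n : Int)) := by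
          intro k' hk'
          by_cases hkk : k' = k
          · subst hkk
            rw [PySem.List.index?_append_of_mem [k'] hmem]
            exact hinv k' hk'
          · rw [index?_append_singleton_of_ne pre k k' hkk]
            exact hinv k' hk'
        have hlen : ((pre.length : Int) + 1) = (((pre ++ [k]).length : Nat) : Int) := by
          simp
        simp only [List.foldl_cons, hstep, List.filterMap_cons, hB]
        rw [hlen, ih (pre ++ [k]) seen (acc ++ [dupMsg (pre.length : Int) j]) hinv']
        simp [List.append_assoc]
      | none =>
        -- fresh key: A records it, B sees its own position as the first occurrence
        have hidx : (PySem.List.index? pre k).map (fun n => (n : Int)) = none := by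
          rw [← hinv k hk]; exact hg
        have hidx' : PySem.List.index? pre k = none := by
          cases hi : PySem.List.index? pre k with
          | none => rfl
          | some m => rw [hi] at hidx; simp at hidx
        have hnmem : k ∉ pre := by
          rw [PySem.List.index?_eq_none_iff] at hidx'
          exact hidx'
        have hstep : stepA (seen, acc) ((pre.length : Int), k)
            = (seen.insert k (pre.length : Int), acc) := by
          simp [stepA, hk, hg]
        have hBidx : PySem.List.index? (pre ++ k :: rest) k = some pre.length := by
          rw [PySem.List.index?_eq_some_iff]
          exact ⟨pre, rest, rfl, rfl, hnmem⟩
        have hB : stepB (pre ++ k :: rest) ((pre.length : Int), k) = none := by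
          simp only [stepB, if_neg hk]
          rw [hBidx]
          simp
        have hBself : PySem.List.index? (pre ++ [k]) k = some pre.length := by
          rw [PySem.List.index?_eq_some_iff]
          exact ⟨pre, [], rfl, rfl, hnmem⟩
        have hinv' : ∀ k' : String, k' ≠ "" →
            (seen.insert k (pre.length : Int)).get? k'
              = (PySem.List.index? (pre ++ [k]) k').map (fun n => (n : Int)) := by
          intro k' hk'
          by_cases hkk : k' = k
          · subst hkk
            rw [PySem.Dict.get?_insert_self, hBself]
            rfl
          · rw [PySem.Dict.get?_insert_of_ne _ _ hkk, index?_append_singleton_of_ne pre k k' hkk]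
            exact hinv k' hk'
        have hlen : ((pre.length : Int) + 1) = (((pre ++ [k]).length : Nat) : Int) := by
          simp
        simp only [List.foldl_cons, hstep, List.filterMap_cons, hB]
        rw [hlen, ih (pre ++ [k]) (seen.insert k (pre.length : Int)) acc hinv']
        simp [List.append_assoc]

-- A computes the canonical pairs, formatted
theorem A_eq_Cpairs (slots : List (List (String × String))) :
    check_duplicate_keys slots
      = (Cpairs (slots.map getKey)).map (fun q => dupMsg q.1 q.2) := by
  unfold check_duplicate_keys Cpairs
  have hfold :
      (PySem.List.enumerate slots (0 : Int)).foldl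
        (fun (st : PySem.Dict String Int × List String) p =>
          let key := getKey p.2
          if key = "" then st
          else
            match st.1.get? key with
            | some j => (st.1, st.2 ++ [dupMsg p.1 j])
            | none => (st.1.insert key p.1, st.2))
        (PySem.Dict.empty, [])
      = (PySem.List.enumerate (slots.map getKey) (0 : Int)).foldl stepA
          (PySem.Dict.empty, []) := by
    rw [enumerate_map getKey slots 0, List.foldl_map]
    rfl
  have hmain := loop_eq (slots.map getKey) [] PySem.Dict.empty []
    (by intro k _; simp [PySem.Dict.get?_empty])
  simp only [List.nil_append, List.length_nil, Int.natCast_zero] at hmain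
  rw [hfold, hmain, List.map_filterMap]
  exact List.filterMap_congr (fun p _ => stepB_eq_map_stepP _ p)

-- ascending positions of key k in ks, starting at index s
def occ (ks : List String) (s : Int) (k : String) : List Int :=
  ((PySem.List.enumerate ks s).filter (fun p => p.2 == k)).map (fun p => p.1)

theorem occ_lb : ∀ (ks : List String) (s : Int) (k : String) (i : Int),
    i ∈ occ ks s k → s ≤ i := by
  intro ks s k i h
  simp only [occ, List.mem_map, List.mem_filter] at h
  obtain ⟨p, ⟨hp, -⟩, rfl⟩ := h
  rw [PySem.List.mem_enumerate_iff] at hp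
  obtain ⟨m, hm, rfl⟩ := hp
  simp

theorem occ_first : ∀ (ks : List String) (n : Nat) (s : Int) (k : String),
    PySem.List.index? ks k = some n →
    ∃ rest, occ ks s k = (s + (n : Int)) :: rest ∧ ∀ r ∈ rest, s + (n : Int) < r := by
  intro ks
  induction ks with
  | nil => intro n s k h; simp [PySem.List.index?_eq_idxOf?] at h
  | cons x ks ih =>
    intro n s k h
    by_cases hx : x = k
    · subst hx
      rw [PySem.List.index?_cons_self] at h
      obtain rfl : (0 : Nat) = n := by simpa using h
      refine ⟨occ ks (s + 1) x, ?_, ?_⟩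
      · simp [occ, PySem.List.enumerate_cons]
      · intro r hr
        have := occ_lb ks (s + 1) x r hr
        omega
    · rw [PySem.List.index?_cons_of_ne ks hx] at h
      obtain ⟨m, hm, rfl⟩ : ∃ m, PySem.List.index? ks k = some m ∧ m + 1 = n := by
        cases hi : PySem.List.index? ks k with
        | none => rw [hi] at h; simp at h
        | some m => rw [hi] at h; simp at h; exact ⟨m, rfl, h⟩
      obtain ⟨rest, hocc, hrest⟩ := ih m (s + 1) k hm
      have hocc' : occ (x :: ks) s k = occ ks (s + 1) k := by
        simp [occ, PySem.List.enumerate_cons, hx]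
      refine ⟨rest, ?_, ?_⟩
      · rw [hocc', hocc]
        congr 1
        push_cast
        ring
      · intro r hr
        have := hrest r hr
        push_cast
        push_cast at this
        omega

theorem filterMap_eq_filterMap_filter {α β : Type} (p : α → Bool) (f : α → Option β)
    (h : ∀ x, p x = false → f x = none) :
    ∀ l : List α, l.filterMap f = (l.filter p).filterMap f := by
  intro l
  induction l with
  | nil => rfl
  | cons x l ih =>
    cases hp : p x with
    | true => simp [List.filter_cons, hp, List.filterMap_cons, ih]
    | false => simp [List.filter_cons, hp, h x hp, ih]

theorem flatMap_congr_mem {α β : Type} (l : List α) (f g : α → List β)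
    (h : ∀ x ∈ l, f x = g x) : l.flatMap f = l.flatMap g := by
  induction l with
  | nil => rfl
  | cons x l ih =>
    simp only [List.flatMap_cons, h x (by simp)]
    rw [ih (fun y hy => h y (by simp [hy]))]

theorem filterMap_flatMap {α β γ : Type} (l : List α) (g : α → List β) (f : β → Option γ) :
    (l.flatMap g).filterMap f = l.flatMap (fun a => (g a).filterMap f) := by
  induction l with
  | nil => rfl
  | cons x l ih => simp [List.flatMap_cons, List.filterMap_append, ih]

theorem sum_ite_mem (K : List String) (hnd : K.Nodup) (k : String) (c : Nat) :
    (K.map (fun x => if k == x then c else 0)).sum = if k ∈ K then c else 0 := by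
  induction K with
  | nil => simp
  | cons x K ih =>
    rw [List.nodup_cons] at hnd
    rw [List.map_cons, List.sum_cons, ih hnd.2]
    by_cases hk : k = x
    · subst hk
      simp [hnd.1]
    · have hb : (k == x) = false := by simp [hk]
      simp [hb, hk]

theorem gather (lp : List (String × Int)) :
    ((PySem.Set.ofList (lp.map (fun q => q.1))).flatMap
        (fun k => lp.filter (fun q => q.1 == k))).Perm lp := by
  rw [List.perm_iff_count]
  intro x
  rw [List.count_flatMap]
  have hmap : ((PySem.Set.ofList (lp.map (fun q => q.1))).map
        (List.count x ∘ fun k => lp.filter (fun q => q.1 == k)))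
      = (PySem.Set.ofList (lp.map (fun q => q.1))).map
          (fun k => if x.1 == k then lp.count x else 0) := by
    apply List.map_congr_left
    intro k _
    by_cases hxk : x.1 = k
    · simp only [Function.comp_apply, beq_iff_eq, if_pos hxk]
      exact List.count_filter (by simp [hxk])
    · simp only [Function.comp_apply, beq_iff_eq, if_neg hxk]
      rw [List.count_eq_zero]
      intro hmem
      rw [List.mem_filter] at hmem
      exact hxk (by simpa using hmem.2)
  rw [hmap, sum_ite_mem _ (PySem.Set.nodup_ofList _) x.1 (lp.count x)]
  by_cases hx : x ∈ lp
  · rw [if_pos (by rw [PySem.Set.mem_ofList]; exact List.mem_map.mpr ⟨x, hx, rfl⟩)]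
  · rw [List.count_eq_zero.mpr hx]
    split <;> rfl

-- proof-side names for B's intermediate objects
def leL (keys : List String) : List (Int × String) :=
  (PySem.List.enumerate keys 0).filter (fun p => decide ¬(p.2 = ""))

def lpL (keys : List String) : List (String × Int) :=
  (leL keys).map (fun p => (p.2, p.1))

def KL (keys : List String) : List String :=
  PySem.Set.ofList ((lpL keys).map (fun q => q.1))

def Gfun (keys : List String) (k : String) : List Int :=
  ((lpL keys).filter (fun q => q.1 == k)).map (fun q => q.2)

def fB (idxs : List Int) : List (Int × Int) :=
  (PySem.List.slice idxs (some 1) none).map (fun i => (i, PySem.List.pyGetD idxs 0 0))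

def stepQ (keys : List String) (q : String × Int) : Option (Int × Int) :=
  stepP keys (q.2, q.1)

theorem stepP_fst (keys : List String) (p : Int × String) (q : Int × Int)
    (h : stepP keys p = some q) : q.1 = p.1 := by
  unfold stepP at h
  split_ifs at h with h1
  cases h2 : PySem.List.index? keys p.2 with
  | none => rw [h2] at h; simp at h
  | some j =>
    rw [h2] at h
    simp only [Option.bind_some] at h
    split_ifs at h with h3
    cases h
    rfl

theorem cpairs_pairwise (keys : List String) :
    (Cpairs keys).Pairwise (fun a b => a.1 < b.1) := by
  refine List.Pairwise.filterMap (stepP keys) ?_ (PySem.List.pairwise_lt_enumerate keys 0)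
  intro a a' h b hb b' hb'
  rw [stepP_fst keys a b hb, stepP_fst keys a' b' hb']
  exact h

theorem groups_eq (slots : List (List (String × String))) :
    (PySem.List.enumerate slots 0).foldl
      (fun (g : PySem.Dict String (List Int)) p =>
        if getKey p.2 = "" then g else g.modify (getKey p.2) [] (· ++ [p.1]))
      PySem.Dict.empty
    = (lpL (slots.map getKey)).foldl
        (fun d q => d.modify q.1 [] (· ++ [q.2])) PySem.Dict.empty := by
  have h1 : (PySem.List.enumerate slots 0).foldl
      (fun (g : PySem.Dict String (List Int)) p =>
        if getKey p.2 = "" then g else g.modify (getKey p.2) [] (· ++ [p.1]))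
      PySem.Dict.empty
      = (PySem.List.enumerate (slots.map getKey) 0).foldl
        (fun (g : PySem.Dict String (List Int)) p =>
          if p.2 = "" then g else g.modify p.2 [] (· ++ [p.1]))
        PySem.Dict.empty := by
    rw [enumerate_map getKey slots 0, List.foldl_map]
  rw [h1]
  unfold lpL leL
  simp only [List.foldl_map]
  rw [← PySem.List.foldl_ite_eq_foldl_filter (fun p : Int × String => ¬(p.2 = ""))
    (fun (d : PySem.Dict String (List Int)) (p : Int × String) => d.modify p.2 [] (· ++ [p.1]))]
  apply PySem.List.foldl_congr_mem
  intro acc x _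
  rw [ite_not]

theorem getD_groups (keys : List String) (k : String) :
    ((lpL keys).foldl (fun (d : PySem.Dict String (List Int)) q =>
        d.modify q.1 [] (· ++ [q.2])) PySem.Dict.empty).getD k []
      = Gfun keys k := by
  rw [PySem.Dict.getD_foldl_modify_append]
  simp [Gfun]

theorem keys_groups (keys : List String) :
    ((lpL keys).foldl (fun (d : PySem.Dict String (List Int)) q =>
        d.modify q.1 [] (· ++ [q.2])) PySem.Dict.empty).keys = KL keys := by
  rw [PySem.Dict.keys_foldl_modify_key (lpL keys) (fun q => q.1) []
    (fun _ q => (· ++ [q.2])) PySem.Dict.empty]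
  rw [PySem.Dict.keys_empty, PySem.Set.update_nil_left]
  rfl

theorem nodup_keys_groups (keys : List String) :
    ((lpL keys).foldl (fun (d : PySem.Dict String (List Int)) q =>
        d.modify q.1 [] (· ++ [q.2])) PySem.Dict.empty).keys.Nodup := by
  exact PySem.Dict.nodup_keys_foldl_modify_key (lpL keys) (fun q => q.1) []
    (fun _ q => (· ++ [q.2])) PySem.Dict.empty (by simp [PySem.Dict.keys_empty])

theorem occG (keys : List String) (k : String) (hk : k ≠ "") :
    Gfun keys k = occ keys 0 k := by
  unfold Gfun lpL leL occ
  rw [List.filter_map, List.map_map, List.filter_filter]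
  rw [List.filter_congr (q := fun p : Int × String => p.2 == k) (by
    intro x _
    by_cases hxk : x.2 = k
    · simp only [Function.comp_apply, hxk, beq_self_eq_true, Bool.true_and]
      simp [hk]
    · simp [hxk])]
  exact List.map_congr_left (fun a _ => rfl)

theorem mem_KL (keys : List String) (k : String) (hk : k ∈ KL keys) :
    k ≠ "" ∧ k ∈ keys := by
  unfold KL at hk
  rw [PySem.Set.mem_ofList] at hk
  obtain ⟨q, hq, rfl⟩ := List.mem_map.mp hk
  unfold lpL leL at hq
  obtain ⟨p, hp, rfl⟩ := List.mem_map.mp hq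
  rw [List.mem_filter] at hp
  obtain ⟨hpe, hpne⟩ := hp
  constructor
  · simpa using hpne
  · rw [PySem.List.mem_enumerate_iff] at hpe
    obtain ⟨m, hm, rfl⟩ := hpe
    simp [List.getElem_mem]

theorem cpairs_eq (keys : List String) :
    Cpairs keys = (lpL keys).filterMap (stepQ keys) := by
  unfold Cpairs lpL leL
  rw [filterMap_eq_filterMap_filter (fun p : Int × String => decide ¬(p.2 = ""))
    (stepP keys) (by
      intro x hx
      unfold stepP
      rw [if_pos (by simpa using hx)])
    (PySem.List.enumerate keys 0)]
  rw [List.filterMap_map]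
  rfl

theorem perkey (keys : List String) (k : String) (hk : k ∈ KL keys) :
    ((lpL keys).filter (fun q => q.1 == k)).filterMap (stepQ keys) = fB (Gfun keys k) := by
  obtain ⟨hkne, hkmem⟩ := mem_KL keys k hk
  obtain ⟨n, hn⟩ : ∃ n, PySem.List.index? keys k = some n := by
    have hs := (PySem.List.index?_isSome_iff keys k).mpr hkmem
    cases hi : PySem.List.index? keys k with
    | none => rw [hi] at hs; simp at hs
    | some n => exact ⟨n, rfl⟩
  obtain ⟨rest, hocc, hrest⟩ := occ_first keys n 0 k hn
  simp only [zero_add] at hocc hrest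
  have hG : Gfun keys k = (n : Int) :: rest := by rw [occG keys k hkne, hocc]
  have hfst : ∀ q ∈ (lpL keys).filter (fun q => q.1 == k), q.1 = k := by
    intro q hq
    have h2 := (List.mem_filter.mp hq).2
    simpa using h2
  have hLrw : (lpL keys).filter (fun q => q.1 == k)
      = (((lpL keys).filter (fun q => q.1 == k)).map (fun q => q.2)).map (fun i => (k, i)) := by
    rw [List.map_map]
    symm
    calc ((lpL keys).filter (fun q => q.1 == k)).map
          ((fun i => (k, i)) ∘ (fun q : String × Int => q.2))
        = ((lpL keys).filter (fun q => q.1 == k)).map id :=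
          List.map_congr_left (fun q hq => by
            have h1 := hfst q hq
            simp [Function.comp, ← h1])
      _ = (lpL keys).filter (fun q => q.1 == k) :=
          List.map_id _
  have hGL : ((lpL keys).filter (fun q => q.1 == k)).map (fun q => q.2) = (n : Int) :: rest := by
    rw [← hG]
    rfl
  conv_lhs => rw [hLrw]
  rw [List.filterMap_map, hGL]
  have hn' : List.idxOf? k keys = some n := by
    rw [← PySem.List.index?_eq_idxOf?]
    exact hn
  have hhead : ((stepQ keys) ∘ (fun i : Int => (k, i))) ((n : Int)) = none := by
    simp [stepQ, stepP, hn', hkne]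
  rw [List.filterMap_cons_none hhead]
  rw [List.filterMap_congr (g := fun i : Int => some (i, (n : Int))) (fun r hr => by
    simp [stepQ, stepP, hn', hkne, (hrest r hr).ne])]
  rw [hG]
  unfold fB
  rw [PySem.List.slice_from_one, List.tail_cons, PySem.List.pyGetD_zero_cons]
  exact List.filterMap_eq_map_iff_forall_eq_some.mpr fun _ _ => rfl

-- B computes the canonical pairs too
theorem B_eq_Cpairs (slots : List (List (String × String))) :
    check_duplicate_keys_alt slots
      = (Cpairs (slots.map getKey)).map (fun q => dupMsg q.1 q.2) := by
  simp only [check_duplicate_keys_alt]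
  rw [groups_eq slots]
  rw [PySem.Dict.values_eq_map_keys _ (nodup_keys_groups (slots.map getKey)) []]
  rw [PySem.List.foldl_append_eq_flatMap]
  simp only [List.nil_append]
  have hvals : (((lpL (slots.map getKey)).foldl (fun (d : PySem.Dict String (List Int)) q =>
        d.modify q.1 [] (· ++ [q.2])) PySem.Dict.empty).keys).map
        (fun k => ((lpL (slots.map getKey)).foldl (fun (d : PySem.Dict String (List Int)) q =>
          d.modify q.1 [] (· ++ [q.2])) PySem.Dict.empty).getD k [])
      = (KL (slots.map getKey)).map (Gfun (slots.map getKey)) := by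
    rw [keys_groups]
    exact List.map_congr_left (fun k _ => getD_groups (slots.map getKey) k)
  rw [hvals, List.flatMap_map]
  have hper : (KL (slots.map getKey)).flatMap
        (fun k => fB (Gfun (slots.map getKey) k))
      = ((KL (slots.map getKey)).flatMap
          (fun k => (lpL (slots.map getKey)).filter (fun q => q.1 == k))).filterMap
            (stepQ (slots.map getKey)) := by
    refine Eq.trans (flatMap_congr_mem _ _ _
      (fun k hk => (perkey (slots.map getKey) k hk).symm)) ?_
    exact (filterMap_flatMap _ _ _).symm
  have hperm : (Cpairs (slots.map getKey)).Perm
      ((KL (slots.map getKey)).flatMap (fun k => fB (Gfun (slots.map getKey) k))) := by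
    rw [cpairs_eq, hper]
    exact ((gather (lpL (slots.map getKey))).filterMap (stepQ (slots.map getKey))).symm
  have hsorted := PySem.List.sorted_eq_of_perm_of_pairwise_lt
    ((KL (slots.map getKey)).flatMap (fun k => fB (Gfun (slots.map getKey) k)))
    (Cpairs (slots.map getKey)) (fun p : Int × Int => p.1) hperm
    (cpairs_pairwise (slots.map getKey))
  simp only [fB] at hsorted
  rw [hsorted]

-- ===== VERDICT (by name: the statement is the Claim_ definition above) =====
theorem check_duplicate_keys_spec : Claim_equal_check_duplicate_keys := by
  intro slots _
  unfold Spec_check_duplicate_keys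
  rw [A_eq_Cpairs, B_eq_Cpairs]
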